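-- pv_equiv track=rewrite | github.com/dansolin-png/ebam-chatbot | server/routes/history.py | _best_record_per_session
-- ===== SOURCE A (Python) =====
-- def _best_record_per_session(records: list[dict]) -> list[dict]:
--     """
--     When a session has both partial and complete S3 objects, keep only the
--     best one: complete > timeout > partial.
--     """
--     rank = {"complete": 0, "timeout": 1, "partial": 2}
--     best = {}
--     for r in records:
--         sid = r.get("session_id", r["history_id"])
--         rt  = r.get("record_type", "partial")
--         if sid not in best or rank.get(rt, 9) < rank.get(best[sid].get("record_type", "partial"), 9):
--             best[sid] = r
--     return sorted(best.values(), key=lambda x: x.get("original_created_at", ""))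
-- ===== SOURCE B (Python) =====
-- def _best_record_per_session(records: list[dict]) -> list[dict]:
--     """Group records per session, then pick each group's minimum-rank record."""
--     rank = {"complete": 0, "timeout": 1, "partial": 2}
--
--     def rk(r):
--         return rank.get(r.get("record_type", "partial"), 9)
--
--     groups = {}
--     for r in records:
--         groups.setdefault(r.get("session_id", r["history_id"]), []).append(r)
--     winners = [min(g, key=rk) for g in groups.values()]
--     return sorted(winners, key=lambda x: x.get("original_created_at", ""))
-- ===== Notes on version B (the rewrite author's own statement) =====
-- stated objective: alternative
-- what changed: B replaces A's single running-best dictionary (compare-and-overwrite per record) by a group-by-session dictionary of record lists followed by a per-group first-minimum-rank selection (Python's min with a key), keeping the final timestamp sort.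
import Mathlib
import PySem

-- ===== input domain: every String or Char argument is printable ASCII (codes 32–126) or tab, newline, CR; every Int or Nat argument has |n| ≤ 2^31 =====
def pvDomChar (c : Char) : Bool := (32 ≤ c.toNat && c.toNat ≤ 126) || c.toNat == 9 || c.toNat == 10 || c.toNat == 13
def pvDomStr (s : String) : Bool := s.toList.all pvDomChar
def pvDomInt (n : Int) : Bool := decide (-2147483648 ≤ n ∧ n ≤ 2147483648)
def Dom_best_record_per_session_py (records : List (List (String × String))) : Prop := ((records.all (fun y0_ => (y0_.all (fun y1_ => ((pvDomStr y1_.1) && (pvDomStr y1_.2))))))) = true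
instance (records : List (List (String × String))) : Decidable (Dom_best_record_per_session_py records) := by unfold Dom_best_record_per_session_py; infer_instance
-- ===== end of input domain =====

-- B replaces A's running-best dictionary by a group-per-session dictionary of lists
-- followed by a per-group first-minimum selection (objective: alternative decomposition,
-- same cost). Return-value equivalence only; neither program mutates its argument.

-- ===== PORT A =====
-- dicts in the records are association lists: r.get(k, d) = value of the FIRST pair with key k, else d
def pvGet? (r : List (String × String)) (k : String) : Option String :=
  (r.find? (fun p => p.1 == k)).map (·.2)

def pvGetD (r : List (String × String)) (k d : String) : String :=
  (pvGet? r k).getD d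

-- the literal dict rank = {"complete": 0, "timeout": 1, "partial": 2}
def pvRankD : PySem.Dict String Int :=
  PySem.Dict.ofList [("complete", 0), ("timeout", 1), ("partial", 2)]

-- sid = r.get("session_id", r["history_id"]); Python evaluates r["history_id"] eagerly and
-- raises KeyError when it is absent — those inputs are excluded by Pre_ (default "" unreachable inside Pre_)
def pvSid (r : List (String × String)) : String :=
  (pvGet? r "session_id").getD (pvGetD r "history_id" "")

def best_record_per_session_py (records : List (List (String × String))) : List (List (String × String)) :=
  let best := records.foldl
    (fun (best : PySem.Dict String (List (String × String))) r =>
      let sid := pvSid r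
      let rt := pvGetD r "record_type" "partial"
      if best.contains sid = false ∨
          pvRankD.getD rt 9 < pvRankD.getD (pvGetD (best.getD sid []) "record_type" "partial") 9
      then best.insert sid r
      else best)
    PySem.Dict.empty
  PySem.List.sorted best.values (fun x => pvGetD x "original_created_at" "") false

-- ===== PORT B =====
-- rk(r) of Source B
def pvRank (r : List (String × String)) : Int :=
  pvRankD.getD (pvGetD r "record_type" "partial") 9

def best_record_per_session_py_alt (records : List (List (String × String))) : List (List (String × String)) :=
  let groups := records.foldl
    (fun (g : PySem.Dict String (List (List (String × String)))) r =>
      g.modify (pvSid r) [] (· ++ [r]))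
    PySem.Dict.empty
  -- min(g, key=rk): first minimum; every group is nonempty, so the [] default is unreachable
  let winners := groups.values.map (fun g => (PySem.List.min? g pvRank).getD [])
  PySem.List.sorted winners (fun x => pvGetD x "original_created_at" "") false

-- ===== PRECONDITION & SPEC =====
-- Pre_ excludes exactly the inputs on which A raises KeyError: A evaluates r["history_id"]
-- for every record (the eager default of r.get), so every record must carry a "history_id" key.
def Pre_best_record_per_session_py (records : List (List (String × String))) : Prop :=
  records.all (fun r => (pvGet? r "history_id").isSome) = true
instance (records : List (List (String × String))) : Decidable (Pre_best_record_per_session_py records) := by unfold Pre_best_record_per_session_py; infer_instance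

def pvWitness_best_record_per_session_py : (List (List (String × String))) :=
  [[("history_id", "h1"), ("record_type", "partial"), ("original_created_at", "2024")],
   [("history_id", "h1"), ("record_type", "complete"), ("original_created_at", "2023")]]

def Spec_best_record_per_session_py (records : List (List (String × String))) (out : List (List (String × String))) : Prop := out = best_record_per_session_py_alt records
instance (records : List (List (String × String))) (out : List (List (String × String))) : Decidable (Spec_best_record_per_session_py records out) := by unfold Spec_best_record_per_session_py; infer_instance

-- ===== CLAIM (what is proved, stated in full; the proofs are below) =====
def Claim_equal_best_record_per_session_py : Prop := ∀ (records : List (List (String × String))), Dom_best_record_per_session_py records → Pre_best_record_per_session_py records → Spec_best_record_per_session_py records (best_record_per_session_py records)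

-- ===== LEMMAS AND PROOFS =====

-- the per-group winner B selects, and the item shape that relates the two dictionaries
def pvMin (g : List (List (String × String))) : List (String × String) :=
  (PySem.List.min? g pvRank).getD []

def pvF (p : String × List (List (String × String))) : String × List (String × String) :=
  (p.1, pvMin p.2)

def pvStepA (best : PySem.Dict String (List (String × String))) (r : List (String × String)) :
    PySem.Dict String (List (String × String)) :=
  if best.contains (pvSid r) = false ∨ pvRank r < pvRank (best.getD (pvSid r) [])
  then best.insert (pvSid r) r
  else best

def pvStepB (g : PySem.Dict String (List (List (String × String)))) (r : List (String × String)) :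
    PySem.Dict String (List (List (String × String))) :=
  g.modify (pvSid r) [] (· ++ [r])

-- A's dict is the image of B's dict under pvF (same keys, same order, winner values)
def pvInv (dA : PySem.Dict String (List (String × String)))
    (dB : PySem.Dict String (List (List (String × String)))) : Prop :=
  dA.items = dB.items.map pvF ∧ (∀ p ∈ dB.items, p.2 ≠ []) ∧ dB.keys.Nodup

lemma pvMin_append_singleton (g : List (List (String × String))) (m r : List (String × String))
    (hm : PySem.List.min? g pvRank = some m) :
    pvMin (g ++ [r]) = if pvRank r < pvRank m then r else m := by
  unfold pvMin
  unfold PySem.List.min? at hm ⊢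
  rw [List.foldl_append, hm]
  simp only [List.foldl]
  split <;> simp

lemma pv_eq_of_nodup_fst {α β : Type} (L : List (α × β)) (h : (L.map Prod.fst).Nodup)
    {p q : α × β} (hp : p ∈ L) (hq : q ∈ L) (e : p.1 = q.1) : p = q := by
  induction L with
  | nil => cases hp
  | cons a t ih =>
    simp only [List.map_cons, List.nodup_cons] at h
    rcases List.mem_cons.mp hp with rfl | hp' <;> rcases List.mem_cons.mp hq with rfl | hq'
    · rfl
    · exact absurd (e ▸ List.mem_map_of_mem hq') h.1
    · exact absurd (e ▸ List.mem_map_of_mem hp') h.1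
    · exact ih h.2 hp' hq'

lemma pv_contains_map (LB : List (String × List (List (String × String)))) (s : String) :
    (PySem.Dict.mk (LB.map pvF)).contains s = (PySem.Dict.mk LB).contains s := by
  simp only [PySem.Dict.contains, List.any_map]
  rfl

lemma pvInv_step (dA : PySem.Dict String (List (String × String)))
    (dB : PySem.Dict String (List (List (String × String))))
    (r : List (String × String)) (h : pvInv dA dB) : pvInv (pvStepA dA r) (pvStepB dB r) := by
  obtain ⟨h1, h2, h3⟩ := h
  obtain ⟨LB⟩ := dB
  have hA : dA = ⟨LB.map pvF⟩ := PySem.Dict.ext (by simpa using h1)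
  subst hA
  simp only [PySem.Dict.keys] at h3
  by_cases hc : (PySem.Dict.mk LB).contains (pvSid r) = true
  · -- the session is already present: B appends r to its group, A keeps the better record
    obtain ⟨pg, hfind⟩ : ∃ pg, LB.find? (fun p => p.1 == pvSid r) = some pg := by
      cases hf : LB.find? (fun p => p.1 == pvSid r) with
      | none =>
        have hall := List.find?_eq_none.mp hf
        have : LB.any (fun p => p.1 == pvSid r) = false :=
          List.any_eq_false.mpr (fun p hp => hall p hp)
        simp only [PySem.Dict.contains] at hc
        rw [hc] at this
        cases this
      | some pg => exact ⟨pg, rfl⟩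
    have hpgmem : pg ∈ LB := List.mem_of_find?_eq_some hfind
    have hpg1 : pg.1 = pvSid r := by
      have := List.find?_some hfind; simpa using this
    have hgne : pg.2 ≠ [] := h2 pg hpgmem
    obtain ⟨m, hm⟩ : ∃ m, PySem.List.min? pg.2 pvRank = some m := by
      cases hmm : PySem.List.min? pg.2 pvRank with
      | none => exact absurd ((PySem.List.min?_eq_none_iff _ _).mp hmm) hgne
      | some m => exact ⟨m, rfl⟩
    have hminpg : pvMin pg.2 = m := by simp [pvMin, hm]
    have hgetB : (PySem.Dict.mk LB).getD (pvSid r) [] = pg.2 := by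
      simp [PySem.Dict.getD, PySem.Dict.get?, hfind]
    have hfindA : (LB.map pvF).find? (fun p => p.1 == pvSid r) = some (pvF pg) := by
      have : (LB.map pvF).find? (fun p => p.1 == pvSid r)
          = (LB.find? ((fun p => p.1 == pvSid r) ∘ pvF)).map pvF := List.find?_map ..
      rw [this]
      have hcomp : ((fun (p : String × List (String × String)) => p.1 == pvSid r) ∘ pvF)
          = (fun (p : String × List (List (String × String))) => p.1 == pvSid r) := rfl
      rw [hcomp, hfind]; rfl
    have hgetA : (PySem.Dict.mk (LB.map pvF)).getD (pvSid r) [] = m := by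
      simp only [PySem.Dict.getD, PySem.Dict.get?, hfindA]
      simpa [pvF] using hminpg
    have hcA : (PySem.Dict.mk (LB.map pvF)).contains (pvSid r) = true := by
      rw [pv_contains_map]; exact hc
    have hstepB : (pvStepB ⟨LB⟩ r).items
        = LB.map (fun p => if p.1 == pvSid r then (pvSid r, pg.2 ++ [r]) else p) := by
      unfold pvStepB
      rw [PySem.Dict.modify, hgetB, PySem.Dict.items_insert_of_contains _ _ hc]
    by_cases hlt : pvRank r < pvRank m
    · -- r outranks the current winner: A overwrites, B's new group minimum is r
      have hcond : pvStepA ⟨LB.map pvF⟩ r = (PySem.Dict.mk (LB.map pvF)).insert (pvSid r) r := by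
        unfold pvStepA
        rw [if_pos (Or.inr (by rw [hgetA]; exact hlt))]
      refine ⟨?_, ?_, ?_⟩
      · rw [hcond, PySem.Dict.items_insert_of_contains _ _ hcA, hstepB]
        simp only [List.map_map]
        refine List.map_congr_left (fun p hp => ?_)
        by_cases hps : p.1 = pvSid r
        · simp only [Function.comp, pvF, hps, BEq.rfl, if_true]
          rw [pvMin_append_singleton pg.2 m r hm, if_pos hlt]
        · simp [Function.comp, pvF, hps]
      · rw [hstepB]
        intro q hq
        obtain ⟨p, hp, rfl⟩ := List.mem_map.mp hq
        by_cases hps : (p.1 == pvSid r) = true <;> simp [hps, h2 p hp]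
      · show ((pvStepB ⟨LB⟩ r).items.map Prod.fst).Nodup
        rw [hstepB, List.map_map]
        have : (Prod.fst ∘ fun p => if p.1 == pvSid r then (pvSid r, pg.2 ++ [r]) else p)
            = (Prod.fst : String × List (List (String × String)) → String) := by
          funext p
          by_cases hps : (p.1 == pvSid r) = true
          · simp [Function.comp, eq_of_beq hps]
          · simp [Function.comp, hps]
        rw [this]; exact h3
    · -- the current winner stays: A is unchanged, B's group minimum is unchanged
      have hnc : ¬ ((PySem.Dict.mk (LB.map pvF)).contains (pvSid r) = false ∨
          pvRank r < pvRank ((PySem.Dict.mk (LB.map pvF)).getD (pvSid r) [])) := by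
        rw [hcA, hgetA]
        rintro (hco | hco)
        · cases hco
        · exact hlt hco
      have hcond : pvStepA ⟨LB.map pvF⟩ r = ⟨LB.map pvF⟩ := by
        unfold pvStepA
        rw [if_neg hnc]
      refine ⟨?_, ?_, ?_⟩
      · rw [hcond, hstepB]
        simp only [List.map_map]
        refine List.map_congr_left (fun p hp => ?_)
        by_cases hps : p.1 = pvSid r
        · have hpq : p = pg := pv_eq_of_nodup_fst LB h3 hp hpgmem (hps.trans hpg1.symm)
          simp only [Function.comp, hps, BEq.rfl, if_true, pvF]
          rw [pvMin_append_singleton pg.2 m r hm, if_neg hlt, hpq, hminpg]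
        · simp [Function.comp, pvF, hps]
      · rw [hstepB]
        intro q hq
        obtain ⟨p, hp, rfl⟩ := List.mem_map.mp hq
        by_cases hps : (p.1 == pvSid r) = true <;> simp [hps, h2 p hp]
      · show ((pvStepB ⟨LB⟩ r).items.map Prod.fst).Nodup
        rw [hstepB, List.map_map]
        have : (Prod.fst ∘ fun p => if p.1 == pvSid r then (pvSid r, pg.2 ++ [r]) else p)
            = (Prod.fst : String × List (List (String × String)) → String) := by
          funext p
          by_cases hps : (p.1 == pvSid r) = true
          · simp [Function.comp, eq_of_beq hps]
          · simp [Function.comp, hps]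
        rw [this]; exact h3
  · -- a fresh session: both dictionaries append
    have hcb : (PySem.Dict.mk LB).contains (pvSid r) = false := by
      cases hx : (PySem.Dict.mk LB).contains (pvSid r)
      · rfl
      · exact absurd hx hc
    have hcA : (PySem.Dict.mk (LB.map pvF)).contains (pvSid r) = false := by
      rw [pv_contains_map]; exact hcb
    have hstepB : (pvStepB ⟨LB⟩ r).items = LB ++ [(pvSid r, [r])] := by
      unfold pvStepB
      rw [PySem.Dict.modify, PySem.Dict.getD_of_not_contains _ _ hcb,
        PySem.Dict.items_insert_of_not_contains _ _ hcb]
      rfl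
    have hcond : pvStepA ⟨LB.map pvF⟩ r = (PySem.Dict.mk (LB.map pvF)).insert (pvSid r) r := by
      unfold pvStepA
      rw [if_pos (Or.inl hcA)]
    refine ⟨?_, ?_, ?_⟩
    · rw [hcond, PySem.Dict.items_insert_of_not_contains _ _ hcA, hstepB]
      simp only [List.map_append, List.map_cons, List.map_nil]
      have : pvF (pvSid r, [r]) = (pvSid r, r) := by
        simp [pvF, pvMin, PySem.List.min?, List.foldl]
      rw [this]
    · rw [hstepB]
      intro q hq
      rcases List.mem_append.mp hq with hq' | hq'
      · exact h2 q hq'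
      · simp only [List.mem_singleton] at hq'; subst hq'; simp
    · show ((pvStepB ⟨LB⟩ r).items.map Prod.fst).Nodup
      rw [hstepB]
      simp only [List.map_append, List.map_cons, List.map_nil]
      rw [List.nodup_append]
      have hnm : pvSid r ∉ LB.map (fun x => x.1) := by
        intro hmem
        obtain ⟨p, hp, hp1⟩ := List.mem_map.mp hmem
        have hfalse : LB.any (fun p => p.1 == pvSid r) = false := by
          simpa [PySem.Dict.contains] using hcb
        have := List.any_eq_false.mp hfalse p hp
        simp [hp1] at this
      refine ⟨h3, List.nodup_singleton _, ?_⟩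
      intro a ha b hb
      rcases List.mem_cons.mp hb with rfl | h'
      · exact fun he => hnm (he ▸ ha)
      · cases h'

lemma pvInv_fold (records : List (List (String × String)))
    (dA : PySem.Dict String (List (String × String)))
    (dB : PySem.Dict String (List (List (String × String))))
    (h : pvInv dA dB) :
    pvInv (records.foldl pvStepA dA) (records.foldl pvStepB dB) := by
  induction records generalizing dA dB with
  | nil => exact h
  | cons r t ih => exact ih _ _ (pvInv_step dA dB r h)

-- ===== VERDICT (by name: the statement is the Claim_ definition above) =====
theorem best_record_per_session_py_spec : Claim_equal_best_record_per_session_py := by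
  intro records _ _
  unfold Spec_best_record_per_session_py
  show PySem.List.sorted (records.foldl pvStepA PySem.Dict.empty).values
        (fun x => pvGetD x "original_created_at" "") false
      = PySem.List.sorted (((records.foldl pvStepB PySem.Dict.empty).values).map
        (fun g => (PySem.List.min? g pvRank).getD [])) (fun x => pvGetD x "original_created_at" "") false
  have h := pvInv_fold records PySem.Dict.empty PySem.Dict.empty
    ⟨rfl, ⟨by intro p hp; simp [PySem.Dict.empty] at hp, by simp [PySem.Dict.empty, PySem.Dict.keys]⟩⟩
  have hv : (records.foldl pvStepA PySem.Dict.empty).values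
      = ((records.foldl pvStepB PySem.Dict.empty).values).map
        (fun g => (PySem.List.min? g pvRank).getD []) := by
    simp only [PySem.Dict.values, h.1, List.map_map]
    rfl
  rw [hv]
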